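-- pv_equiv track=rewrite | github.com/BToadere/Msc.Computer-Science | Tecnicas Heurísticas y Meta-Heurísticas/MetaHeurísticos/Tabu Search/src/solver/neighborhood.py | apply_swap_move
-- ===== SOURCE A (Python) =====
-- from typing import Dict, List, Tuple, Generator, Set, Union
--
-- def apply_swap_move(
--     current_schedule: Dict[int, List[int]],
--     move: Tuple[int, int]
-- ) -> Dict[int, List[int]]:
--     """
--     Aplica un movimiento de swap a un schedule y devuelve el NUEVO schedule.
--     Funciona para operaciones adyacentes y no adyacentes.
--     """
--     u, v = move
--     # Create a new schedule by dictionary comprehension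
--     new_schedule = {machine_id: list(ops) for machine_id, ops in current_schedule.items()}
--
--     for machine, operations in new_schedule.items():
--         for i in range(len(operations) - 1):
--             # Check if u and v are adjacent in the current operations list
--             if operations[i] == u and operations[i + 1] == v:
--                 # Swap them
--                 operations[i], operations[i + 1] = operations[i + 1], operations[i]
--                 return new_schedule
--             elif operations[i] == v and operations[i + 1] == u:
--                 # Swap them
--                 operations[i], operations[i + 1] = operations[i + 1], operations[i]
--                 return new_schedule
-- ===== SOURCE B (Python) =====
-- def apply_swap_move(current_schedule, move):
--     """Position-index algorithm: per machine build the index sets of u and v,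
--     intersect the shifted sets to get all adjacent-match positions, take the
--     minimum; then rebuild the whole schedule with that one swap applied."""
--     u, v = move
--     items = list(current_schedule.items())
--     hit = None
--     for k, (machine, ops) in enumerate(items):
--         pu = {i for i, x in enumerate(ops) if x == u}
--         pv = {i for i, x in enumerate(ops) if x == v}
--         cand = {i for i in pu if i + 1 in pv} | {i for i in pv if i + 1 in pu}
--         if cand:
--             hit = (k, min(cand))
--             break
--     if hit is None:
--         return None
--     k, i = hit
--     return {machine: (ops[:i] + [ops[i + 1], ops[i]] + ops[i + 2:] if j == k else list(ops))
--             for j, (machine, ops) in enumerate(items)}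
-- ===== Notes on version B (the rewrite author's own statement) =====
-- stated objective: alternative
-- what changed: B replaces A's nested adjacent-pair scan over a mutated copy by a position-index algorithm: per machine it builds the index sets of u and v, intersects the shifted sets to get every adjacent match position, takes min() of that candidate set, and then rebuilds the whole schedule positionally with the single swap applied via slicing.
import Mathlib
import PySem

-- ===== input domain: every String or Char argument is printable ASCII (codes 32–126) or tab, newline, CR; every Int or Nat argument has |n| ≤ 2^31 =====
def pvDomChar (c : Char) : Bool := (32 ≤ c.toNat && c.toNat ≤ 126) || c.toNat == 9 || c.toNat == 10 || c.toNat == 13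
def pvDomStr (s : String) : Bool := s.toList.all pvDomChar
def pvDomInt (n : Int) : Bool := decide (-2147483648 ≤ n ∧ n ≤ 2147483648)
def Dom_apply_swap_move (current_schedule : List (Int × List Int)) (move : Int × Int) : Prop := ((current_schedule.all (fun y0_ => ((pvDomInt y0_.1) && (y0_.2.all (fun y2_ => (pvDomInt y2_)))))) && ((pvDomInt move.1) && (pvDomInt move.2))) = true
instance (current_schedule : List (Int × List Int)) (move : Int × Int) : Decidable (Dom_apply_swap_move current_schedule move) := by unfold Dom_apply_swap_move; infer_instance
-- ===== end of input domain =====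

-- B replaces A's adjacent-pair scan by a position-index algorithm: per machine it builds
-- the index sets of u and v, intersects the shifted sets to get every adjacent match
-- position and takes the minimum; then it rebuilds the schedule with that one swap.

-- ===== PORT A =====
-- inner `for i in range(len(operations) - 1)` loop of A: scan by index, swap in place at the first hit
def swapAdjA (u v : Int) (ops : List Int) (i : Nat) : Option (List Int) :=
  if h : i + 1 < ops.length then
    if ops[i]'(by omega) == u && ops[i+1]'h == v then
      some ((ops.set i (ops[i+1]'h)).set (i+1) (ops[i]'(by omega)))
    else if ops[i]'(by omega) == v && ops[i+1]'h == u then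
      some ((ops.set i (ops[i+1]'h)).set (i+1) (ops[i]'(by omega)))
    else swapAdjA u v ops (i+1)
  else none
termination_by ops.length - i

-- outer loop of A over the (already fully copied) schedule; copying is the identity on pure lists
def applyA (u v : Int) : List (Int × List Int) → Option (List (Int × List Int))
  | [] => none
  | (m, ops) :: rest =>
    match swapAdjA u v ops 0 with
    | some ops' => some ((m, ops') :: rest)
    | none => (applyA u v rest).map (fun r => (m, ops) :: r)

def apply_swap_move (current_schedule : List (Int × List Int)) (move : Int × Int) : Option (List (Int × List Int)) :=
  applyA move.1 move.2 current_schedule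

-- ===== PORT B =====
-- {i for i, x in enumerate(ops) if x == w}
def posSetB (w : Int) (ops : List Int) : PySem.Set Int :=
  PySem.Set.ofList (((PySem.List.enumerate ops 0).filter (fun p => p.2 == w)).map (fun p => p.1))

-- cand = {i for i in pu if i + 1 in pv} | {i for i in pv if i + 1 in pu}
def candB (u v : Int) (ops : List Int) : PySem.Set Int :=
  PySem.Set.union
    (PySem.Set.ofList ((posSetB u ops).filter (fun i => PySem.Set.contains (posSetB v ops) (i+1))))
    (PySem.Set.ofList ((posSetB v ops).filter (fun i => PySem.Set.contains (posSetB u ops) (i+1))))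

-- `for k, (machine, ops) in enumerate(items): … break`: first machine with a nonempty cand, min(cand)
def findHitB (u v : Int) (k : Nat) : List (Int × List Int) → Option (Nat × Int)
  | [] => none
  | (_, ops) :: rest =>
    match PySem.List.min? (candB u v ops) (fun x => x) with
    | some i => some (k, i)
    | none => findHitB u v (k+1) rest

-- ops[:i] + [ops[i + 1], ops[i]] + ops[i + 2:]
-- (whenever B reaches this, i and i+1 are in range, so the `.getD 0` default is unreachable)
def swapRowB (ops : List Int) (i : Int) : List Int :=
  PySem.List.slice ops none (some i)
    ++ [(PySem.List.pyGet? ops (i+1)).getD 0, (PySem.List.pyGet? ops i).getD 0]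
    ++ PySem.List.slice ops (some (i+2)) none

def apply_swap_move_alt (current_schedule : List (Int × List Int)) (move : Int × Int) : Option (List (Int × List Int)) :=
  match findHitB move.1 move.2 0 current_schedule with
  | none => none
  | some (k, i) =>
      some ((PySem.List.enumerate current_schedule 0).map
        (fun q => if q.1 == (k : Int) then (q.2.1, swapRowB q.2.2 i) else (q.2.1, q.2.2)))

-- ===== PRECONDITION & SPEC =====
def Spec_apply_swap_move (current_schedule : List (Int × List Int)) (move : Int × Int) (out : Option (List (Int × List Int))) : Prop := out = apply_swap_move_alt current_schedule move
instance (current_schedule : List (Int × List Int)) (move : Int × Int) (out : Option (List (Int × List Int))) : Decidable (Spec_apply_swap_move current_schedule move out) := by unfold Spec_apply_swap_move; infer_instance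

-- ===== CLAIM =====
def Claim_equal_apply_swap_move : Prop := ∀ (current_schedule : List (Int × List Int)) (move : Int × Int), Dom_apply_swap_move current_schedule move → Spec_apply_swap_move current_schedule move (apply_swap_move current_schedule move)

-- ===== LEMMAS AND PROOFS =====

-- "there is an adjacent (u,v)/(v,u) pair at position n"
def hitAt (u v : Int) (ops : List Int) (n : Nat) : Prop :=
  n + 1 < ops.length ∧
    ((ops.getD n 0 = u ∧ ops.getD (n+1) 0 = v) ∨ (ops.getD n 0 = v ∧ ops.getD (n+1) 0 = u))

theorem mem_posSetB {w : Int} {ops : List Int} {j : Int} :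
    j ∈ posSetB w ops ↔ ∃ n : Nat, j = (n : Int) ∧ ∃ h : n < ops.length, ops[n] = w := by
  simp only [posSetB, PySem.Set.mem_ofList, List.mem_map, List.mem_filter,
    PySem.List.mem_enumerate_iff]
  constructor
  · rintro ⟨p, ⟨⟨k, hk, rfl⟩, hw⟩, rfl⟩
    exact ⟨k, by simp, hk, by simpa using hw⟩
  · rintro ⟨n, rfl, hn, hw⟩
    exact ⟨((n : Int), ops[n]), ⟨⟨n, hn, by simp⟩, by simpa using hw⟩, rfl⟩

theorem mem_candB {u v : Int} {ops : List Int} {j : Int} :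
    j ∈ candB u v ops ↔ ∃ n : Nat, j = (n : Int) ∧ hitAt u v ops n := by
  simp only [candB, PySem.Set.mem_union, PySem.Set.mem_ofList, List.mem_filter,
    PySem.Set.contains_iff, mem_posSetB, hitAt]
  constructor
  · rintro (⟨⟨n, rfl, hn, hu⟩, m, hm1, hm, hv⟩ | ⟨⟨n, rfl, hn, hu⟩, m, hm1, hm, hv⟩) <;>
    · have hmn : m = n + 1 := by omega
      subst hmn
      refine ⟨n, rfl, by omega, ?_⟩
      simp only [List.getD_eq_getElem _ _ hn, List.getD_eq_getElem _ _ hm]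
      first
      | exact Or.inl ⟨hu, hv⟩
      | exact Or.inr ⟨hu, hv⟩
  · rintro ⟨n, rfl, hlen, hc⟩
    have hn : n < ops.length := by omega
    have hm : n + 1 < ops.length := hlen
    rw [List.getD_eq_getElem _ _ hn, List.getD_eq_getElem _ _ hm] at hc
    rcases hc with ⟨hu, hv⟩ | ⟨hu, hv⟩
    · exact Or.inl ⟨⟨n, rfl, hn, hu⟩, n + 1, by push_cast; ring, hm, hv⟩
    · exact Or.inr ⟨⟨n, rfl, hn, hu⟩, n + 1, by push_cast; ring, hm, hv⟩

-- the index A's inner scan stops at, mirrored as a plain search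
def firstHitA (u v : Int) (ops : List Int) (i : Nat) : Option Nat :=
  if h : i + 1 < ops.length then
    if (ops[i]'(by omega) == u && ops[i+1]'h == v) || (ops[i]'(by omega) == v && ops[i+1]'h == u) then
      some i
    else firstHitA u v ops (i+1)
  else none
termination_by ops.length - i

theorem swapAdjA_eq_firstHit (u v : Int) (ops : List Int) (i : Nat) :
    swapAdjA u v ops i =
      (firstHitA u v ops i).map
        (fun n => (ops.set n (ops[n+1]?.getD 0)).set (n+1) (ops[n]?.getD 0)) := by
  fun_induction swapAdjA u v ops i with
  | case1 i h h1 =>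
    rw [firstHitA, dif_pos h, if_pos (by simp [h1])]
    have e1 : ops[i]? = some (ops[i]'(by omega)) := List.getElem?_eq_getElem (by omega)
    have e2 : ops[i+1]? = some (ops[i+1]'h) := List.getElem?_eq_getElem h
    simp [e1, e2]
  | case2 i h h1 h2 =>
    rw [firstHitA, dif_pos h, if_pos (by simp [h2])]
    have e1 : ops[i]? = some (ops[i]'(by omega)) := List.getElem?_eq_getElem (by omega)
    have e2 : ops[i+1]? = some (ops[i+1]'h) := List.getElem?_eq_getElem h
    simp [e1, e2]
  | case3 i h h1 h2 ih =>
    rw [firstHitA, dif_pos h,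
      if_neg (by simp only [Bool.or_eq_true]; rintro (hh | hh); exacts [h1 hh, h2 hh])]
    exact ih
  | case4 i h =>
    rw [firstHitA, dif_neg h]
    rfl

theorem firstHitA_none {u v : Int} {ops : List Int} {i : Nat}
    (h : firstHitA u v ops i = none) : ∀ n, i ≤ n → ¬ hitAt u v ops n := by
  fun_induction firstHitA u v ops i with
  | case1 i hl hc => simp at h
  | case2 i hl hc ih =>
    intro n hin hn
    rcases Nat.eq_or_lt_of_le hin with heq | hlt
    · obtain ⟨hlen, hor⟩ := hn
      rw [← heq] at hlen hor
      rw [List.getD_eq_getElem _ _ (by omega : i < ops.length),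
        List.getD_eq_getElem _ _ hl] at hor
      simp only [Bool.or_eq_true, Bool.and_eq_true, beq_iff_eq] at hc
      tauto
    · exact ih h n hlt hn
  | case3 i hl =>
    intro n hin hn
    exact absurd hn.1 (by omega)

theorem firstHitA_some {u v : Int} {ops : List Int} {i n : Nat}
    (h : firstHitA u v ops i = some n) :
    i ≤ n ∧ hitAt u v ops n ∧ ∀ m, i ≤ m → hitAt u v ops m → n ≤ m := by
  fun_induction firstHitA u v ops i with
  | case1 i hl hc =>
    simp only [Option.some.injEq] at h
    subst h
    refine ⟨le_refl _, ⟨hl, ?_⟩, fun m him _ => him⟩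
    rw [List.getD_eq_getElem _ _ (by omega : i < ops.length), List.getD_eq_getElem _ _ hl]
    simpa using hc
  | case2 i hl hc ih =>
    obtain ⟨h1, h2, h3⟩ := ih h
    refine ⟨by omega, h2, fun m him hm => ?_⟩
    rcases Nat.eq_or_lt_of_le him with heq | hlt
    · exfalso
      obtain ⟨hlen, hor⟩ := hm
      rw [← heq] at hlen hor
      rw [List.getD_eq_getElem _ _ (by omega : i < ops.length),
        List.getD_eq_getElem _ _ hl] at hor
      simp only [Bool.or_eq_true, Bool.and_eq_true, beq_iff_eq] at hc
      tauto
    · exact h3 m (by omega) hm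
  | case3 i hl => simp at h

-- double in-place set = take/cons/drop rebuild
theorem setset (n : Nat) : ∀ (l : List Int) (a b : Int), n + 1 < l.length →
    (l.set n b).set (n+1) a = l.take n ++ b :: a :: l.drop (n+2) := by
  induction n with
  | zero =>
    intro l a b h
    match l, h with
    | x :: y :: t, _ => simp
  | succ m ih =>
    intro l a b h
    match l, h with
    | x :: t, h =>
      have ht : m + 1 < t.length := by simp at h; omega
      simp [List.set_cons_succ, ih t a b ht]

-- the in-place double set of A equals the slice rebuild of B
theorem rowEq {ops : List Int} {n : Nat} (h : n + 1 < ops.length) :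
    (ops.set n (ops[n+1]?.getD 0)).set (n+1) (ops[n]?.getD 0) = swapRowB ops (n : Int) := by
  have hn : n < ops.length := by omega
  have e1 : ops[n]? = some (ops[n]'hn) := List.getElem?_eq_getElem hn
  have e2 : ops[n+1]? = some (ops[n+1]'h) := List.getElem?_eq_getElem h
  have h1 : ((n : Int) + 1) = ((n + 1 : Nat) : Int) := by push_cast; ring
  have h2 : ((n : Int) + 2) = ((n + 2 : Nat) : Int) := by push_cast; ring
  rw [swapRowB, h1, h2, PySem.List.slice_to_natCast, PySem.List.slice_from_natCast,
    PySem.List.pyGet?_natCast, PySem.List.pyGet?_natCast, e1, e2]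
  simp only [Option.getD_some]
  rw [setset n ops _ _ h]
  simp

-- per machine: A's scan agrees with min over B's candidate set
theorem rowBridge (u v : Int) (ops : List Int) :
    swapAdjA u v ops 0 =
      (PySem.List.min? (candB u v ops) (fun x => x)).map (fun i => swapRowB ops i) := by
  rw [swapAdjA_eq_firstHit]
  cases hmin : PySem.List.min? (candB u v ops) (fun x => x) with
  | none =>
    rw [PySem.List.min?_eq_none_iff] at hmin
    cases hfa : firstHitA u v ops 0 with
    | none => simp
    | some n =>
      obtain ⟨-, hhit, -⟩ := firstHitA_some hfa
      have hmem : (n : Int) ∈ candB u v ops := mem_candB.mpr ⟨n, rfl, hhit⟩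
      rw [hmin] at hmem
      simp at hmem
  | some j =>
    obtain ⟨n, rfl, hhit⟩ := mem_candB.mp (PySem.List.min?_mem hmin)
    cases hfa : firstHitA u v ops 0 with
    | none => exact absurd hhit (firstHitA_none hfa n (Nat.zero_le n))
    | some n0 =>
      obtain ⟨-, hhit0, hleast⟩ := firstHitA_some hfa
      have hle1 : n0 ≤ n := hleast n (Nat.zero_le n) hhit
      have hle2 : (n : Int) ≤ (n0 : Int) :=
        PySem.List.min?_isMin hmin _ (mem_candB.mpr ⟨n0, rfl, hhit0⟩)
      have hn0 : n0 = n := by omega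
      subst hn0
      simp only [Option.map_some, Option.some.injEq]
      exact rowEq hhit0.1

theorem findHitB_succ (u v : Int) (rest : List (Int × List Int)) :
    ∀ k, findHitB u v (k+1) rest = (findHitB u v k rest).map (fun p => (p.1 + 1, p.2)) := by
  induction rest with
  | nil => intro k; rfl
  | cons e rest ih =>
    intro k
    obtain ⟨m, ops⟩ := e
    simp only [findHitB]
    cases PySem.List.min? (candB u v ops) (fun x => x) with
    | some i => rfl
    | none => exact ih (k+1)

-- tail of the rebuild map when the hit index lies strictly before the enumeration start
theorem tail_lt (i : Int) (xs : List (Int × List Int)) (t : Int) :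
    ∀ s : Int, t < s →
      (PySem.List.enumerate xs s).map
        (fun q => if q.1 == t then (q.2.1, swapRowB q.2.2 i) else (q.2.1, q.2.2)) = xs := by
  induction xs with
  | nil => intro s _; rfl
  | cons x xs ih =>
    intro s hs
    rw [PySem.List.enumerate_cons, List.map_cons]
    have hb : ((s : Int) == t) = false := by rw [beq_eq_false_iff_ne]; omega
    simp only [hb, Bool.false_eq_true, if_false]
    rw [ih (s+1) (by omega)]

-- shifting the enumeration start and the hit index together changes nothing
theorem tail_shift (i : Int) (xs : List (Int × List Int)) (t : Int) :
    ∀ s : Int,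
      (PySem.List.enumerate xs (s+1)).map
        (fun q => if q.1 == t+1 then (q.2.1, swapRowB q.2.2 i) else (q.2.1, q.2.2))
      = (PySem.List.enumerate xs s).map
          (fun q => if q.1 == t then (q.2.1, swapRowB q.2.2 i) else (q.2.1, q.2.2)) := by
  induction xs with
  | nil => intro s; rfl
  | cons x xs ih =>
    intro s
    rw [PySem.List.enumerate_cons, PySem.List.enumerate_cons, List.map_cons, List.map_cons]
    have hb : ((s + 1 : Int) == t + 1) = (s == t) := by
      rcases Bool.eq_false_or_eq_true (s == t) with hst | hst <;> rw [hst] <;>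
        first
        | (rw [beq_iff_eq] at hst ⊢; omega)
        | (rw [beq_eq_false_iff_ne] at hst ⊢; omega)
    rw [hb, ih (s+1)]

theorem applyA_eq (u v : Int) : ∀ cs : List (Int × List Int),
    applyA u v cs =
      match findHitB u v 0 cs with
      | none => none
      | some (k, i) =>
          some ((PySem.List.enumerate cs 0).map
            (fun q => if q.1 == (k : Int) then (q.2.1, swapRowB q.2.2 i) else (q.2.1, q.2.2))) := by
  intro cs
  induction cs with
  | nil => rfl
  | cons e rest ih =>
    obtain ⟨m, ops⟩ := e
    simp only [applyA, findHitB, rowBridge u v ops]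
    cases hmin : PySem.List.min? (candB u v ops) (fun x => x) with
    | some i =>
      simp only [Option.map_some]
      rw [PySem.List.enumerate_cons, List.map_cons,
        tail_lt i rest ((0 : Nat) : Int) (0+1) (by norm_num)]
      simp
    | none =>
      simp only [Option.map_none]
      rw [ih, findHitB_succ u v rest 0]
      cases hf : findHitB u v 0 rest with
      | none => simp
      | some p =>
        obtain ⟨k, i⟩ := p
        simp only [Option.map_some]
        rw [PySem.List.enumerate_cons, List.map_cons]
        have hk1 : ((k + 1 : Nat) : Int) = (k : Int) + 1 := by push_cast; ring
        rw [hk1, tail_shift i rest ((k : Nat) : Int) 0]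
        have hb : ((0 : Int) == (k : Int) + 1) = false := by rw [beq_eq_false_iff_ne]; omega
        simp [hb]

-- ===== VERDICT =====
theorem apply_swap_move_spec : Claim_equal_apply_swap_move := by
  intro cs move _
  unfold Spec_apply_swap_move apply_swap_move apply_swap_move_alt
  exact applyA_eq move.1 move.2 cs
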